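-- pv_equiv track=rewrite | github.com/keki/adventofcode | 2021/18/2/solve.py | find_explosion_index
-- ===== SOURCE A (Python) =====
-- def find_explosion_index(arr):
--     lvl = 0
--     for i, v in enumerate(arr):
--         if (v == '['):
--             if (lvl == 4):
--                 return i
--             else:
--                 lvl += 1
--         elif (v == ']'):
--             lvl -= 1
-- ===== SOURCE B (Python) =====
-- def find_explosion_index(arr):
--     # Two-pass: build a cumulative depth table, then scan it for the
--     # first '[' whose inclusive depth is 5 (i.e. the fifth open bracket).
--     depths = []
--     d = 0
--     for v in arr:
--         d += 1 if v == '[' else (-1 if v == ']' else 0)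
--         depths.append(d)
--     for i, v in enumerate(arr):
--         if v == '[' and depths[i] == 5:
--             return i
--     return None
-- ===== Notes on version B (the rewrite author's own statement) =====
-- stated objective: alternative
-- what changed: A decides while maintaining a running nesting counter in one interleaved loop; B first builds a cumulative depth table over the whole string in one pass, then in a second pass returns the first index holding '[' with inclusive depth 5.
import Mathlib
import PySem

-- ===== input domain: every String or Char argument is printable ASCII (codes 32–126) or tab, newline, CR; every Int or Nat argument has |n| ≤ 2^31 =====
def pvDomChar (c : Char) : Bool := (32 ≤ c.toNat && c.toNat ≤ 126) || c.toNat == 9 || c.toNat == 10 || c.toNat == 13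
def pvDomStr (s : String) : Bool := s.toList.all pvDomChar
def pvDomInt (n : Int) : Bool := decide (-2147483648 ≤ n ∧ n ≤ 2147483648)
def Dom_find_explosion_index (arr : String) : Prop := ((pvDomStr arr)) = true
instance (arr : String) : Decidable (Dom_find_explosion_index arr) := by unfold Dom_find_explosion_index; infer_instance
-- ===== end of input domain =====

-- B replaces A's interleaved count-and-decide loop by a cumulative depth table built
-- in one pass followed by a separate scan for the first '[' of inclusive depth 5
-- (alternative decomposition, same O(n) cost).

-- ===== PORT A =====
-- loop of A: running level counter, early return at a '[' seen at level 4
-- (the index counter i transcribes Python's enumerate)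
def pvGoA : List Char → Nat → Int → Option Int
  | [], _, _ => none
  | v :: rest, i, lvl =>
    if v == '[' then
      if lvl == 4 then some (i : Int) else pvGoA rest (i + 1) (lvl + 1)
    else if v == ']' then pvGoA rest (i + 1) (lvl - 1)
    else pvGoA rest (i + 1) lvl

def find_explosion_index (arr : String) : Option Int :=
  pvGoA arr.toList 0 0

-- ===== PORT B =====
-- first pass of B: cumulative depth after each character
def pvDepths : List Char → Int → List Int
  | [], _ => []
  | v :: rest, d =>
    let d' := d + (if v == '[' then 1 else if v == ']' then -1 else 0)
    d' :: pvDepths rest d'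

-- second pass of B: first index i with arr[i] = '[' and depths[i] = 5
def pvScanB : List (Char × Int) → Nat → Option Int
  | [], _ => none
  | (v, dep) :: rest, i =>
    if v == '[' && dep == 5 then some (i : Int) else pvScanB rest (i + 1)

def find_explosion_index_alt (arr : String) : Option Int :=
  pvScanB (arr.toList.zip (pvDepths arr.toList 0)) 0

-- ===== PRECONDITION & SPEC =====
def Spec_find_explosion_index (arr : String) (out : Option Int) : Prop := out = find_explosion_index_alt arr
instance (arr : String) (out : Option Int) : Decidable (Spec_find_explosion_index arr out) := by unfold Spec_find_explosion_index; infer_instance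

-- ===== CLAIM (what is proved, stated in full; the proofs are below) =====
def Claim_equal_find_explosion_index : Prop := ∀ (arr : String), Dom_find_explosion_index arr → Spec_find_explosion_index arr (find_explosion_index arr)

-- ===== LEMMAS AND PROOFS =====

theorem pvGoA_eq_scan (l : List Char) : ∀ (i : Nat) (d : Int),
    pvGoA l i d = pvScanB (l.zip (pvDepths l d)) i := by
  induction l with
  | nil => intro i d; rfl
  | cons v rest ih =>
    intro i d
    by_cases hv : v = '['
    · subst hv
      by_cases hd : d = 4
      · subst hd; simp [pvGoA, pvDepths, pvScanB]
      · have h5 : ¬ (d + 1 = 5) := by omega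
        simp [pvGoA, pvDepths, pvScanB, hd, h5, ih]
    · by_cases hv2 : v = ']'
      · subst hv2
        have : d - 1 = d + -1 := by ring
        simp [pvGoA, pvDepths, pvScanB, ih, this]
      · simp [pvGoA, pvDepths, pvScanB, hv, hv2, ih]

-- ===== VERDICT (by name: the statement is the Claim_ definition above) =====
theorem find_explosion_index_spec : Claim_equal_find_explosion_index := by
  intro arr _
  unfold Spec_find_explosion_index find_explosion_index find_explosion_index_alt
  exact pvGoA_eq_scan arr.toList 0 0
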